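-- pv_equiv track=rewrite | github.com/LinukPerera/Audio-to-MIDI-Converter | main.py | removeRepetitions
-- ===== SOURCE A (Python) =====
-- def removeRepetitions(data, removePartialRepetitions = True):
--     #doesnt remove last triad if it has been repeaded. not ctritcal, just something to keep in mind
--     #search for doubles in every triad
--     for i in range(len(data)):
--         j = 0
--         while j < len(data[i]) -1:
--             if data[i][j] == data[i][j+1]:
--                 del data[i][j+1]
--             else:
--                 j += 1
--
--     #search for triads beeing contained in previous triads
--     if removePartialRepetitions:
--         i = 0
--         while i < len(data) - 1:
--             if all([  j in data[i] for j in data[i+1]]):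
--                 del data[i+1]
--             else:
--                 i += 1
--
--
--     #seach for double triads
--     i = 0
--     while i < len(data) -1:
--         if sorted(data[i]) == sorted(data[i+1]):
--             del data[i+1]
--         else:
--             i += 1
--     return data
-- ===== SOURCE B (Python) =====
-- def removeRepetitions(data, removePartialRepetitions=True):
--     # pass 1: collapse runs of equal neighbours inside each triad (in place)
--     for triad in data:
--         triad[:] = [v for k, v in enumerate(triad) if k == 0 or triad[k - 1] != v]
--
--     # single forward pass: keep a triad unless it is dropped against the last survivor
--     survivors = []
--     for t in data:
--         if survivors:
--             prev = survivors[-1]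
--             if removePartialRepetitions:
--                 drop = all(x in prev for x in t)
--             else:
--                 drop = sorted(prev) == sorted(t)
--             if drop:
--                 continue
--         survivors.append(t)
--     data[:] = survivors
--     return data
-- ===== Notes on version B (the rewrite author's own statement) =====
-- stated objective: simpler
-- what changed: The two separate outer while-loops (subset pass, then sorted-equal pass) are replaced by one forward pass over survivors comparing each triad to the last kept one, relying on the fact that the sorted-equal pass never deletes anything the subset pass left; the inner dedup becomes a one-line comprehension.
import Mathlib
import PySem

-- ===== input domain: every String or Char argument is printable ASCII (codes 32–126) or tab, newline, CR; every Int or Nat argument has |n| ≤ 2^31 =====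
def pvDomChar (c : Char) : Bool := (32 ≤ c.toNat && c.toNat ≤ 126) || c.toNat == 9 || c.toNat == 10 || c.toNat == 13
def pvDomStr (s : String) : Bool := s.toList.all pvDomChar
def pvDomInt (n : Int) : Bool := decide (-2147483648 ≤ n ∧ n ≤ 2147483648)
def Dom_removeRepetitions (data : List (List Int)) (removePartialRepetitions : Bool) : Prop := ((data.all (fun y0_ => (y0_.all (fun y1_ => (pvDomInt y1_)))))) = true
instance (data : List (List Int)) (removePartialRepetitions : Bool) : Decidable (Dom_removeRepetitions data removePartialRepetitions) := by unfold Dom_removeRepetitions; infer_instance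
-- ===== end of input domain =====

-- B replaces A's two outer while-loops by a single survivor pass (simpler); both Pythons
-- mutate `data` and its inner lists in place identically — the theorems are about the return value.

-- ===== PORT A =====
-- Python pass 1 while-loop: at position j, if l[j]==l[j+1] delete l[j+1] (stay at j), else j+=1.
def delAdjA : List Int → List Int
  | [] => []
  | [x] => [x]
  | x :: y :: rest => if x == y then delAdjA (x :: rest) else x :: delAdjA (y :: rest)

-- Python pass 2 while-loop: if all elements of data[i+1] are in data[i], delete data[i+1], else i+=1.
def pass2A : List (List Int) → List (List Int)
  | [] => []
  | [x] => [x]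
  | x :: y :: rest =>
      if y.all (fun j => x.contains j) then pass2A (x :: rest) else x :: pass2A (y :: rest)

-- Python pass 3 while-loop: if sorted(data[i]) == sorted(data[i+1]), delete data[i+1], else i+=1.
def pass3A : List (List Int) → List (List Int)
  | [] => []
  | [x] => [x]
  | x :: y :: rest =>
      if PySem.List.sorted x (fun v => v) false == PySem.List.sorted y (fun v => v) false
      then pass3A (x :: rest) else x :: pass3A (y :: rest)

def removeRepetitions (data : List (List Int)) (removePartialRepetitions : Bool) : List (List Int) :=
  let d1 := data.map delAdjA
  let d2 := if removePartialRepetitions then pass2A d1 else d1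
  pass3A d2

-- ===== PORT B =====
-- B's comprehension: keep triad[k] iff k == 0 or triad[k-1] != triad[k] (prev = previous original element).
def dedupBAux (prev : Int) : List Int → List Int
  | [] => []
  | x :: xs => if x == prev then dedupBAux x xs else x :: dedupBAux x xs

def dedupB : List Int → List Int
  | [] => []
  | x :: xs => x :: dedupBAux x xs

-- B's survivor loop: `prev` is survivors[-1]; drop t against prev by the flag's test, else keep it.
def sweepB (flag : Bool) (prev : List Int) : List (List Int) → List (List Int)
  | [] => []
  | t :: rest =>
      if (if flag then t.all (fun x => prev.contains x)
          else PySem.List.sorted prev (fun v => v) false == PySem.List.sorted t (fun v => v) false)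
      then sweepB flag prev rest
      else t :: sweepB flag t rest

def removeRepetitions_alt (data : List (List Int)) (removePartialRepetitions : Bool) : List (List Int) :=
  match data.map dedupB with
  | [] => []
  | t :: rest => t :: sweepB removePartialRepetitions t rest

-- ===== PRECONDITION & SPEC =====
def Spec_removeRepetitions (data : List (List Int)) (removePartialRepetitions : Bool) (out : List (List Int)) : Prop := out = removeRepetitions_alt data removePartialRepetitions
instance (data : List (List Int)) (removePartialRepetitions : Bool) (out : List (List Int)) : Decidable (Spec_removeRepetitions data removePartialRepetitions out) := by unfold Spec_removeRepetitions; infer_instance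

-- ===== CLAIM (what is proved, stated in full; the proofs are below) =====
def Claim_equal_removeRepetitions : Prop := ∀ (data : List (List Int)) (removePartialRepetitions : Bool), Dom_removeRepetitions data removePartialRepetitions → Spec_removeRepetitions data removePartialRepetitions (removeRepetitions data removePartialRepetitions)

-- ===== LEMMAS AND PROOFS =====

theorem delAdjA_eq (xs : List Int) : ∀ x, delAdjA (x :: xs) = x :: dedupBAux x xs := by
  induction xs with
  | nil => intro x; simp [delAdjA, dedupBAux]
  | cons y rest ih =>
      intro x
      by_cases h : x = y
      · simp [delAdjA, dedupBAux, h, ih]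
      · simp [delAdjA, dedupBAux, h, Ne.symm h, ih]

theorem map_delAdjA_eq (l : List (List Int)) : l.map delAdjA = l.map dedupB := by
  induction l with
  | nil => rfl
  | cons x xs ih =>
      cases x with
      | nil => simp [delAdjA, dedupB, ih]
      | cons a t => simp [dedupB, ← delAdjA_eq, ih]

theorem pass2A_eq (xs : List (List Int)) : ∀ x, pass2A (x :: xs) = x :: sweepB true x xs := by
  induction xs with
  | nil => intro x; simp [pass2A, sweepB]
  | cons y rest ih =>
      intro x
      simp [pass2A, sweepB, ih]
      split_ifs <;> rfl

theorem pass3A_eq (xs : List (List Int)) : ∀ x,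
    pass3A (x :: xs) = x :: sweepB false x xs := by
  induction xs with
  | nil => intro x; simp [pass3A, sweepB]
  | cons y rest ih =>
      intro x
      by_cases h : PySem.List.sorted x (fun v => v) false = PySem.List.sorted y (fun v => v) false <;>
        simp [pass3A, sweepB, h, ih]

-- adjacent pairs in pass 2's output fail the subset test
def Rsub (a b : List Int) : Prop := ¬ ∀ j ∈ b, j ∈ a

theorem sweepB_true_chain (xs : List (List Int)) : ∀ x,
    List.IsChain Rsub (x :: sweepB true x xs) := by
  induction xs with
  | nil => intro x; simpa [sweepB] using List.IsChain.singleton (l := Rsub) x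
  | cons y rest ih =>
      intro x
      simp only [sweepB, if_true]
      by_cases h : ∀ j ∈ y, j ∈ x
      · have hb : (y.all fun j => x.contains j) = true := by simpa using h
        rw [if_pos hb]; exact ih x
      · have hb : ¬ (y.all fun j => x.contains j) = true := by simpa using h
        rw [if_neg hb]
        exact List.isChain_cons_cons.mpr ⟨h, ih y⟩

-- sorted equality implies the subset test succeeds
theorem sortedEq_subset (a b : List Int)
    (h : PySem.List.sorted a (fun v => v) false = PySem.List.sorted b (fun v => v) false) :
    b.all (fun j => a.contains j) = true := by
  have hp : a.Perm b := (PySem.List.sorted_id_eq_sorted_id_iff_perm a b).mp h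
  simp only [List.all_eq_true]
  intro j hj
  simpa [List.contains_iff_mem] using hp.mem_iff.mpr (by simpa using hj)

-- pass 3 is the identity on lists whose adjacent pairs fail the subset test
theorem pass3A_id (l : List (List Int)) (h : List.IsChain Rsub l) : pass3A l = l := by
  induction l with
  | nil => simp [pass3A]
  | cons x xs ih =>
      cases xs with
      | nil => simp [pass3A]
      | cons y rest =>
          have hxy : Rsub x y := (List.isChain_cons_cons.mp h).1
          have htl := (List.isChain_cons_cons.mp h).2
          have hne : ¬ PySem.List.sorted x (fun v => v) false = PySem.List.sorted y (fun v => v) false := by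
            intro he
            exact hxy (by simpa [List.all_eq_true] using sortedEq_subset x y he)
          simp [pass3A, hne, ih htl]

-- ===== VERDICT (by name: the statement is the Claim_ definition above) =====
theorem removeRepetitions_spec : Claim_equal_removeRepetitions := by
  intro data flag _
  unfold Spec_removeRepetitions removeRepetitions removeRepetitions_alt
  rw [map_delAdjA_eq]
  cases hd : data.map dedupB with
  | nil => cases flag <;> simp [pass2A, pass3A]
  | cons t rest =>
      cases flag with
      | false => simpa using pass3A_eq rest t
      | true =>
          have h2 : pass2A (t :: rest) = t :: sweepB true t rest := pass2A_eq rest t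
          simp only [if_true]
          rw [h2, pass3A_id _ (sweepB_true_chain rest t)]
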